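-- pv_equiv track=rewrite | github.com/pypi-data/pypi-mirror-324 | packages/rHDPE-Data-Analysis/rHDPE_Data_Analysis-1.0.122.tar.gz/rHDPE_Data_Analysis-1.0.122/rHDPE_Data_Analysis/SHM_Analysis/Preprocessing.py | remove_files
-- ===== SOURCE A (Python) =====
-- def remove_files( file_data, data, descriptors_to_remove = "" ):
--     '''Remove files not needed/wanted for analysis by searching for letters in file descriptions.'''
--
--     files_to_remove = []
--
--     for i in range( len( file_data ) ):
--
--         s = file_data[i][3]
--
--         for l in descriptors_to_remove:
--
--             if s.find( l ) > -0.5: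
--
--                 files_to_remove.append( i )
--
--                 break
--
--     files_to_remove.reverse()
--
--     for r in files_to_remove:
--
--         file_data.pop( r )
--         data[0].pop( r )
--         data[1].pop( r )
--         data[2].pop( r )
--
--     return file_data, data
-- ===== SOURCE B (Python) =====
-- def remove_files( file_data, data, descriptors_to_remove = "" ):
--     '''Remove files not needed/wanted for analysis by searching for letters in file descriptions.'''
--
--     removed = {i for i, row in enumerate( file_data )
--                if any( l in row[3] for l in descriptors_to_remove )}
--
--     if not removed:
--
--         return file_data, data
--
--     file_data[:] = [row for i, row in enumerate( file_data ) if i not in removed]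
--
--     for j in range( 3 ):
--
--         data[j][:] = [x for i, x in enumerate( data[j] ) if i not in removed]
--
--     return file_data, data
-- ===== Notes on version B (the rewrite author's own statement) =====
-- stated objective: simpler
-- what changed: B computes one keep/remove index mask in a single pass and rebuilds file_data and data[0..2] by filtering each list once (slice-assigned in place), instead of A's collect-indices, reverse, and repeated pop(r) on all four lists.
import Mathlib
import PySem

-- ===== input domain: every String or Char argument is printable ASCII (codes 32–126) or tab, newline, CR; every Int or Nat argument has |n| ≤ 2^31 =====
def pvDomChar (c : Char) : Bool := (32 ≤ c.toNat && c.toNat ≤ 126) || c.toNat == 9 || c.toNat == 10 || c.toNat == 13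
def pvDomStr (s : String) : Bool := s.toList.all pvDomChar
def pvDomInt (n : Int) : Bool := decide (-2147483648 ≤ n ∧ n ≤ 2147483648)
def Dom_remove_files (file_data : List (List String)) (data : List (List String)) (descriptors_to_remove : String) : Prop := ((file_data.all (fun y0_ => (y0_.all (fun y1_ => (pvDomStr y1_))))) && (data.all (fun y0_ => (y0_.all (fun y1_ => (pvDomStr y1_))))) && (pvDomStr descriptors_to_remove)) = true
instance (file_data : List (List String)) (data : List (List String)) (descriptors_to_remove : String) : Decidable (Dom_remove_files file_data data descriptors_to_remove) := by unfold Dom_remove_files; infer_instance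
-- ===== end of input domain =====

-- B rebuilds the four parallel lists in one filtering pass over an index mask instead of
-- collecting indices, reversing them and popping repeatedly (objective: simpler; both
-- versions mutate file_data and data[0..2] in place in Python — the equivalence proved
-- here is about the returned value).


-- ===== PORT A =====
-- ys.pop(r): Python raises IndexError where pop? = none (excluded by Pre_); the getD keeps ys there.
def popL {α : Type} (ys : List α) (r : Int) : List α :=
  ((PySem.List.pop? ys r).map Prod.snd).getD ys

-- data[0].pop(r); data[1].pop(r); data[2].pop(r) — missing entries (data shorter than 3,
-- a Python IndexError) are excluded by Pre_; getD/set are no-ops there.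
def popRow (d : List (List String)) (r : Int) : List (List String) :=
  let d0 := d.set 0 (popL (d.getD 0 []) r)
  let d1 := d0.set 1 (popL (d0.getD 1 []) r)
  d1.set 2 (popL (d1.getD 2 []) r)

-- literal port of A: build files_to_remove (inner for-with-break ported as `any`;
-- `s.find(l) > -0.5` on an int result is `0 ≤ find`), reverse it, pop each index.
def remove_files (file_data : List (List String)) (data : List (List String)) (descriptors_to_remove : String) : List (List String) × List (List String) :=
  let files_to_remove : List Int :=
    (PySem.List.pyRange 0 (PySem.List.len file_data)).foldl
      (fun acc i =>
        if descriptors_to_remove.toList.any (fun l =>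
            decide (0 ≤ PySem.Str.find (PySem.List.pyGetD (PySem.List.pyGetD file_data i []) 3 "") (String.singleton l)))
        then acc ++ [i] else acc) []
  (files_to_remove.reverse).foldl
    (fun st r => (popL st.1 r, popRow st.2 r))
    (file_data, data)

-- ===== PORT B =====
-- any(l in row[3] for l in descriptors_to_remove)  (row[3] out of range is excluded by Pre_)
def hitsRow (descriptors_to_remove : String) (row : List String) : Bool :=
  descriptors_to_remove.toList.any (fun l => PySem.Str.isIn (String.singleton l) (PySem.List.pyGetD row 3 ""))

-- [x for i, x in enumerate(xs) if i not in removed]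
def keepRows {α : Type} (removed : List Int) (xs : List α) : List α :=
  (PySem.List.enumerate xs).filterMap (fun q => if removed.contains q.1 then none else some q.2)

-- literal port of B: one index mask, then one filtering pass per list.
def remove_files_alt (file_data : List (List String)) (data : List (List String)) (descriptors_to_remove : String) : List (List String) × List (List String) :=
  let removed : List Int := PySem.Set.ofList
    ((PySem.List.enumerate file_data).filterMap
      (fun p => if hitsRow descriptors_to_remove p.2 then some p.1 else none))
  if removed.isEmpty then (file_data, data)
  else
    (keepRows removed file_data,
     (List.range 3).foldl (fun d j => d.set j (keepRows removed (d.getD j []))) data)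

-- ===== PRECONDITION & SPEC =====
-- Pre_ = exactly the inputs where the Python A returns normally: every file row has the
-- descriptor field row[3] (A reads it for every row, even with no descriptors), and when
-- some row is flagged, data has at least 3 lists and every flagged index is a valid
-- position in each of data[0..2] (otherwise a pop raises IndexError).
def Pre_remove_files (file_data : List (List String)) (data : List (List String)) (descriptors_to_remove : String) : Prop :=
  (∀ row ∈ file_data, 4 ≤ row.length) ∧
  ((∃ row ∈ file_data, hitsRow descriptors_to_remove row = true) →
     3 ≤ data.length ∧
     ∀ j ∈ List.range 3, ∀ p ∈ file_data.zipIdx,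
       hitsRow descriptors_to_remove p.1 = true → p.2 < (data.getD j []).length)
instance (file_data : List (List String)) (data : List (List String)) (descriptors_to_remove : String) : Decidable (Pre_remove_files file_data data descriptors_to_remove) := by unfold Pre_remove_files; infer_instance

def pvWitness_remove_files : List (List String) × List (List String) × String :=
  ([["a", "b", "c", "ID7"]], ([["1"], ["2"], ["3"]], ""))

def Spec_remove_files (file_data : List (List String)) (data : List (List String)) (descriptors_to_remove : String) (out : List (List String) × List (List String)) : Prop := out = remove_files_alt file_data data descriptors_to_remove
instance (file_data : List (List String)) (data : List (List String)) (descriptors_to_remove : String) (out : List (List String) × List (List String)) : Decidable (Spec_remove_files file_data data descriptors_to_remove out) := by unfold Spec_remove_files; infer_instance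

-- ===== CLAIM (what is proved, stated in full; the proofs are below) =====
def Claim_equal_remove_files : Prop := ∀ (file_data : List (List String)) (data : List (List String)) (descriptors_to_remove : String), Dom_remove_files file_data data descriptors_to_remove → Pre_remove_files file_data data descriptors_to_remove → Spec_remove_files file_data data descriptors_to_remove (remove_files file_data data descriptors_to_remove)


-- ===== LEMMAS AND PROOFS =====

-- the flagged row indices, as naturals
def remIdx (file_data : List (List String)) (desc : String) : List Nat :=
  (List.range file_data.length).filter (fun k => hitsRow desc (file_data.getD k []))

lemma cond_decide (s u : String) : decide (0 ≤ PySem.Str.find s u) = PySem.Str.isIn u s := by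
  by_cases h : u.toList <:+: s.toList <;>
    simp [PySem.Chars.find_nonneg_iff, PySem.Chars.isIn_iff_infix, PySem.Chars.isIn_eq_false_iff, h]

lemma filterMap_if {α β : Type} (l : List α) (p : α → Bool) (f : α → β) :
    l.filterMap (fun k => if p k then some (f k) else none) = (l.filter p).map f := by
  induction l with
  | nil => rfl
  | cons x xs ih => by_cases h : p x <;> simp [h, ih]

lemma containsCast (l : List Nat) (k : Nat) :
    (l.map (Nat.cast : Nat → Int)).contains ((k : Nat) : Int) = l.contains k := by
  simp

-- A's files_to_remove loop is the flagged-index list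
lemma ftr_eq (fd : List (List String)) (desc : String) :
    (PySem.List.pyRange 0 (PySem.List.len fd)).foldl
      (fun acc i =>
        if desc.toList.any (fun l =>
            decide (0 ≤ PySem.Str.find (PySem.List.pyGetD (PySem.List.pyGetD fd i []) 3 "") (String.singleton l)))
        then acc ++ [i] else acc) []
    = (remIdx fd desc).map (Nat.cast : Nat → Int) := by
  rw [PySem.List.len_eq, PySem.List.pyRange_zero_nat, List.foldl_map, PySem.List.foldl_append_if]
  rw [List.nil_append, remIdx]
  exact congrArg (List.map (Nat.cast : Nat → Int)) (List.filter_congr (fun k _ => by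
    simp only [PySem.List.pyGetD_natCast, cond_decide, hitsRow]))

-- B's removed set is the same list
lemma removed_eq (fd : List (List String)) (desc : String) :
    PySem.Set.ofList ((PySem.List.enumerate fd).filterMap
      (fun p => if hitsRow desc p.2 then some p.1 else none))
    = (remIdx fd desc).map (Nat.cast : Nat → Int) := by
  rw [PySem.List.enumerate_eq_map_pyRange fd [], PySem.List.len_eq, PySem.List.pyRange_zero_nat,
    List.map_map, List.filterMap_map]
  have h2 : ((fun p : Int × List String => if hitsRow desc p.2 then some p.1 else none) ∘ (fun j => (j, PySem.List.pyGetD fd j [])) ∘ fun k : Nat => (k : Int)) = (fun k : Nat => if hitsRow desc (fd.getD k []) then some ((Nat.cast : Nat → Int) k) else none) := by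
    funext k
    simp only [Function.comp_apply, PySem.List.pyGetD_natCast]
  rw [h2, filterMap_if (List.range fd.length) (fun k => hitsRow desc (fd.getD k [])) (Nat.cast : Nat → Int), PySem.Set.ofList_eq_self_of_nodup, remIdx]
  exact (List.nodup_range.filter _).map (fun a b h => by exact_mod_cast h)

lemma enumKeep {α : Type} (removed : List Int) (zs : List α) : ∀ (s : Nat),
    (PySem.List.enumerate zs ((s : Nat) : Int)).filterMap (fun q => if removed.contains q.1 then none else some q.2)
    = ((zs.zipIdx s).filter (fun q => !(removed.contains ((q.2 : Nat) : Int)))).map Prod.fst := by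
  induction zs with
  | nil => intro s; simp [PySem.List.enumerate]
  | cons x xs ih =>
    intro s
    rw [PySem.List.enumerate_cons, List.zipIdx_cons]
    have hc : ((s : Int) + 1) = (((s + 1 : Nat)) : Int) := by push_cast; ring
    rw [List.filterMap_cons, List.filter_cons, hc, ih (s + 1)]
    by_cases h : removed.contains ((s : Nat) : Int)
    · simp only [h]; rfl
    · simp only [h]; rfl

lemma keepRows_eq {α : Type} (removed : List Int) (zs : List α) :
    keepRows removed zs
    = ((zs.zipIdx.filter (fun q => !(removed.contains ((q.2 : Nat) : Int)))).map Prod.fst) := by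
  have h := enumKeep removed zs 0
  rw [keepRows]
  rw [show ((0 : Nat) : Int) = (0 : Int) by rfl] at h
  exact h

-- erasing the largest index first = filtering by index membership
lemma eraseKeep {α : Type} (zs : List α) (r : Nat) (l' : List Nat)
    (hr : r < zs.length) (hl : ∀ k ∈ l', k < r) :
    (((zs.eraseIdx r).zipIdx.filter (fun q => !(l'.contains q.2))).map Prod.fst)
    = ((zs.zipIdx.filter (fun q => !((r :: l').contains q.2))).map Prod.fst) := by
  have htl : (zs.take r).length = r := by simp [Nat.le_of_lt hr]
  conv_rhs => rw [← List.take_append_drop r zs, ← List.getElem_cons_drop hr]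
  rw [List.eraseIdx_eq_take_drop_succ]
  rw [List.zipIdx_append, List.zipIdx_append, htl, List.zipIdx_cons]
  simp only [Nat.zero_add]
  rw [List.filter_append, List.filter_append, List.map_append, List.map_append]
  congr 1
  · congr 1
    apply List.filter_congr
    intro q hq
    have hlt : q.2 < r := by
      obtain ⟨a, i⟩ := q
      have := List.mem_zipIdx hq
      simpa [htl] using this.2.1
    simp only [List.contains_eq_mem, List.mem_cons]
    have : ¬ (q.2 = r) := by omega
    simp [this]
  · have h1 : List.filter (fun q : α × Nat => !(l'.contains q.2)) ((zs.drop (r + 1)).zipIdx r) = (zs.drop (r + 1)).zipIdx r := by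
      apply List.filter_eq_self.mpr
      intro q hq
      obtain ⟨a, i⟩ := q
      have hge := (List.mem_zipIdx hq).1
      simp only [List.contains_eq_mem, Bool.not_eq_true', decide_eq_false_iff_not]
      intro hmem
      exact absurd (hl _ hmem) (by omega)
    have h2 : List.filter (fun q : α × Nat => !((r :: l').contains q.2)) ((zs.drop (r + 1)).zipIdx (r + 1)) = (zs.drop (r + 1)).zipIdx (r + 1) := by
      apply List.filter_eq_self.mpr
      intro q hq
      obtain ⟨a, i⟩ := q
      have hge := (List.mem_zipIdx hq).1
      simp only [List.contains_eq_mem, List.mem_cons, Bool.not_eq_true', decide_eq_false_iff_not]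
      rintro (rfl | hmem)
      · omega
      · exact absurd (hl _ hmem) (by omega)
    rw [List.filter_cons, h1, if_neg (by simp), h2]
    rw [List.zipIdx_map_fst, List.zipIdx_map_fst]

-- popping a strictly decreasing index list = filtering by index membership
lemma popFold {α : Type} (l : List Nat) : ∀ (zs : List α),
    l.Pairwise (· > ·) → (∀ k ∈ l, k < zs.length) →
    l.foldl (fun ys k => popL ys ((k : Nat) : Int)) zs
    = ((zs.zipIdx.filter (fun q => !(l.contains q.2))).map Prod.fst) := by
  induction l with
  | nil => intro zs _ _; simp
  | cons r l' ih =>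
    intro zs hp hb
    have hr : r < zs.length := hb r List.mem_cons_self
    have hstep : popL zs ((r : Nat) : Int) = zs.eraseIdx r := by
      simp [popL, PySem.List.pop?_natCast zs r hr]
    have hlt : ∀ k ∈ l', k < r := fun k hk => List.rel_of_pairwise_cons hp hk
    rw [List.foldl_cons, hstep, ih (zs.eraseIdx r) hp.of_cons (fun k hk => by
      have := hlt k hk
      rw [List.length_eraseIdx_of_lt hr]
      omega)]
    exact eraseKeep zs r l' hr hlt

-- popping an increasing index list back-to-front = B's keepRows
lemma keep_eq_pop {α : Type} (L : List Nat) (zs : List α)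
    (hp : L.Pairwise (· < ·)) (hb : ∀ k ∈ L, k < zs.length) :
    L.reverse.foldl (fun ys k => popL ys ((k : Nat) : Int)) zs
    = keepRows (L.map (Nat.cast : Nat → Int)) zs := by
  rw [popFold L.reverse zs (List.pairwise_reverse.mpr hp)
      (fun k hk => hb k (List.mem_reverse.mp hk)), keepRows_eq]
  exact congrArg (List.map Prod.fst) (List.filter_congr (fun q _ => by
    rw [containsCast]
    simp))

lemma set3_collapse {α : Type} (d : List α) (a0 a1 a2 b0 b1 b2 : α) :
    (((((d.set 0 a0).set 1 a1).set 2 a2).set 0 b0).set 1 b1).set 2 b2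
    = ((d.set 0 b0).set 1 b1).set 2 b2 := by
  apply List.ext_getElem?
  intro n
  simp [List.getElem?_set]
  split_ifs <;> simp_all

lemma getD_set_self (d : List (List String)) (i : Nat) (a : List String) (h : i < d.length) :
    (d.set i a).getD i [] = a := by
  simp [List.getD_eq_getElem?_getD, h]

lemma getD_set_ne (d : List (List String)) (i j : Nat) (a : List String) (h : i ≠ j) :
    (d.set i a).getD j [] = d.getD j [] := by
  simp [List.getD_eq_getElem?_getD, List.getElem?_set_ne h]

-- A's triple-pop loop acts componentwise on data[0..2]
lemma dataFold (l : List Nat) : ∀ (d : List (List String)), 3 ≤ d.length →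
    l.foldl (fun d k => popRow d ((k : Nat) : Int)) d
    = ((d.set 0 (l.foldl (fun ys k => popL ys ((k : Nat) : Int)) (d.getD 0 []))).set 1
          (l.foldl (fun ys k => popL ys ((k : Nat) : Int)) (d.getD 1 []))).set 2
          (l.foldl (fun ys k => popL ys ((k : Nat) : Int)) (d.getD 2 [])) := by
  induction l with
  | nil =>
    intro d h3
    simp only [List.foldl_nil]
    rw [List.getD_eq_getElem _ _ (by omega), List.set_getElem_self]
    rw [List.getD_eq_getElem _ _ (by omega), List.set_getElem_self]
    rw [List.getD_eq_getElem _ _ (by omega), List.set_getElem_self]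
  | cons k l' ih =>
    intro d h3
    have e1 : popRow d ((k : Nat) : Int)
        = ((d.set 0 (popL (d.getD 0 []) ((k : Nat) : Int))).set 1 (popL (d.getD 1 []) ((k : Nat) : Int))).set 2 (popL (d.getD 2 []) ((k : Nat) : Int)) := by
      rw [popRow]
      simp only [getD_set_ne _ 0 1 _ (by omega), getD_set_ne _ 0 2 _ (by omega), getD_set_ne _ 1 2 _ (by omega)]
    rw [List.foldl_cons, e1, ih _ (by simpa using h3)]
    rw [getD_set_ne _ 2 0 _ (by omega), getD_set_ne _ 1 0 _ (by omega), getD_set_self _ 0 _ (by omega)]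
    rw [getD_set_ne _ 2 1 _ (by omega), getD_set_self _ 1 _ (by simpa using (by omega : 1 < d.length))]
    rw [getD_set_self _ 2 _ (by simp; omega)]
    rw [set3_collapse]
    simp only [List.foldl_cons]

lemma remIdx_pairwise (fd : List (List String)) (desc : String) :
    (remIdx fd desc).Pairwise (· < ·) :=
  List.pairwise_lt_range.filter _

lemma remIdx_mem (fd : List (List String)) (desc : String) (k : Nat) (hk : k ∈ remIdx fd desc) :
    k < fd.length ∧ hitsRow desc (fd.getD k []) = true := by
  rw [remIdx] at hk
  have h := List.mem_filter.mp hk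
  exact ⟨List.mem_range.mp h.1, h.2⟩

-- ===== VERDICT (by name: the statement is the Claim_ definition above) =====
theorem remove_files_spec : Claim_equal_remove_files := by
  intro fd data desc _ hpre
  obtain ⟨hrows, hdata⟩ := hpre
  unfold Spec_remove_files
  show remove_files fd data desc = remove_files_alt fd data desc
  rw [remove_files, remove_files_alt]
  rw [ftr_eq, removed_eq]
  by_cases hemp : remIdx fd desc = []
  · rw [hemp]
    simp
  · have hne : ((remIdx fd desc).map (Nat.cast : Nat → Int)).isEmpty = false := by
      simp [hemp]
    rw [hne]
    simp only [Bool.false_eq_true, if_false]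
    -- some row is flagged
    obtain ⟨k0, hk0⟩ := List.exists_mem_of_ne_nil _ hemp
    obtain ⟨hk0n, hk0h⟩ := remIdx_mem fd desc k0 hk0
    have hex : ∃ row ∈ fd, hitsRow desc row = true := by
      refine ⟨fd[k0], List.getElem_mem hk0n, ?_⟩
      rwa [List.getD_eq_getElem fd [] hk0n] at hk0h
    have h3 : 3 ≤ data.length := (hdata hex).1
    have hbj : ∀ j, j < 3 → ∀ k ∈ remIdx fd desc, k < (data.getD j []).length := by
      intro j hj k hk
      obtain ⟨hkn, hkh⟩ := remIdx_mem fd desc k hk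
      refine (hdata hex).2 j (List.mem_range.mpr hj) (fd[k], k)
        (List.mem_iff_getElem.mpr ⟨k, by simpa using hkn, by simp⟩) ?_
      rwa [List.getD_eq_getElem fd [] hkn] at hkh
    -- split A's fold into its two components
    rw [← List.map_reverse, List.foldl_map,
      PySem.List.foldl_prod_mk (fun ys k => popL ys ((k : Nat) : Int))
        (fun d k => popRow d ((k : Nat) : Int)) _ fd data]
    -- evaluate B's j-loop
    rw [show List.range 3 = [0, 1, 2] from rfl]
    simp only [List.foldl_cons, List.foldl_nil]
    rw [getD_set_ne _ 0 1 _ (by omega), getD_set_ne _ 1 2 _ (by omega), getD_set_ne _ 0 2 _ (by omega)]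
    -- componentwise equality
    rw [dataFold _ data h3]
    rw [keep_eq_pop _ fd (remIdx_pairwise fd desc) (fun k hk => (remIdx_mem fd desc k hk).1)]
    rw [keep_eq_pop _ (data.getD 0 []) (remIdx_pairwise fd desc) (hbj 0 (by omega))]
    rw [keep_eq_pop _ (data.getD 1 []) (remIdx_pairwise fd desc) (hbj 1 (by omega))]
    rw [keep_eq_pop _ (data.getD 2 []) (remIdx_pairwise fd desc) (hbj 2 (by omega))]
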